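-- pv_equiv track=rewrite | github.com/MoritzSchwerer/TensorBro | tensorbro/code_gen/clang.py | gen_indices_strided
-- ===== SOURCE A (Python) =====
-- CHARACTERS = list(map(chr, range(97, 123)))
--
-- def gen_indices_strided(shape, stride, chars=None):
--     if chars is None:
--         chars = CHARACTERS
--     idx_calc = ""
--     for i in range(len(shape)):
--         if stride[i] != 1:
--             continue
--         idx_calc += f"{chars[i]}"
--         for j, s in enumerate(shape[i+1:]):
--             if stride[i+1+j] != 1:
--                 continue
--             idx_calc += f" * {s}"
--         idx_calc += " + "
--     idx_calc = idx_calc[:-3]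
--
--     return idx_calc
-- ===== SOURCE B (Python) =====
-- CHARACTERS = list(map(chr, range(97, 123)))
--
-- def gen_indices_strided(shape, stride, chars=None):
--     if chars is None:
--         chars = CHARACTERS
--     terms = []
--     suffix = ""
--     for i in range(len(shape) - 1, -1, -1):
--         if stride[i] == 1:
--             terms.append(chars[i] + suffix)
--             suffix = " * {}".format(shape[i]) + suffix
--     return " + ".join(reversed(terms))
-- ===== Notes on version B (the rewrite author's own statement) =====
-- stated objective: alternative
-- what changed: A's nested loops rebuild the ' * shape' factor suffix from scratch for every qualifying index and then trim a trailing ' + '; B makes a single right-to-left pass maintaining the running suffix string and joins the collected terms with ' + '.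
import Mathlib
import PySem

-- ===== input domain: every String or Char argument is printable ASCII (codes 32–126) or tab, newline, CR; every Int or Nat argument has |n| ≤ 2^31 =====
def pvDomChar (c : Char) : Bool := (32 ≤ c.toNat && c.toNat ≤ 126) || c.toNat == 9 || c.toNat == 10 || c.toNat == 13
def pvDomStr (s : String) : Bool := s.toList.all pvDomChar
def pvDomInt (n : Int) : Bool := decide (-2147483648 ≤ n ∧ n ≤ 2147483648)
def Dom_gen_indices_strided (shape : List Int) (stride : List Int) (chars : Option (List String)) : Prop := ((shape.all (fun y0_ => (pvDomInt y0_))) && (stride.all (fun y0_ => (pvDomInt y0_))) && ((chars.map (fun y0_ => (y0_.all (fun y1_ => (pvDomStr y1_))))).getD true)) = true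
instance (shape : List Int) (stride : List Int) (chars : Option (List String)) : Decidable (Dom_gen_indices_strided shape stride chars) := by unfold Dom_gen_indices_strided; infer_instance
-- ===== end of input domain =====

-- B replaces A's nested rescanning loops (recomputing the " * shape" tail for every qualifying index,
-- plus the trailing-" + " trim) by a single right-to-left pass maintaining the running suffix of
-- " * shape" factors, then joins the collected terms; objective: alternative (one pass, no trim).

-- ===== PORT A =====
def pyCHARACTERS : List String :=
  (PySem.List.pyRange 97 123 1).map (fun n => String.ofList [Char.ofNat n.toNat])

def gen_indices_strided (shape : List Int) (stride : List Int) (chars : Option (List String)) : String :=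
  let cs := chars.getD pyCHARACTERS
  let idx_calc := (PySem.List.pyRange 0 shape.length 1).foldl (fun acc i =>
    if PySem.List.pyGetD stride i 0 ≠ 1 then acc
    else
      let acc1 := acc ++ PySem.List.pyGetD cs i ""
      let acc2 := (PySem.List.enumerate (PySem.List.slice shape (some (i+1)) none) 0).foldl
        (fun acc2 (p : Int × Int) =>
          if PySem.List.pyGetD stride (i+1+p.1) 0 ≠ 1 then acc2
          else acc2 ++ (" * " ++ PySem.Int.toStr p.2)) acc1
      acc2 ++ " + ") ""
  PySem.Str.slice idx_calc none (some (-3))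

-- ===== PORT B =====
def gen_indices_strided_alt (shape : List Int) (stride : List Int) (chars : Option (List String)) : String :=
  let cs := chars.getD pyCHARACTERS
  let st := (PySem.List.pyRange ((shape.length : Int) - 1) (-1) (-1)).foldl
    (fun (p : List String × String) i =>
      if PySem.List.pyGetD stride i 0 = 1 then
        (p.1 ++ [PySem.List.pyGetD cs i "" ++ p.2],
         (" * " ++ PySem.Int.toStr (PySem.List.pyGetD shape i 0)) ++ p.2)
      else p) ([], "")
  PySem.Str.join " + " st.1.reverse

-- ===== PRECONDITION & SPEC =====
-- Pre_ excludes exactly the inputs on which the Python A raises IndexError: a stride list shorter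
-- than shape, or a qualifying index (stride[i] == 1) beyond the end of the chars list.
def Pre_gen_indices_strided (shape : List Int) (stride : List Int) (chars : Option (List String)) : Prop :=
  shape.length ≤ stride.length ∧
  ∀ i : Nat, i < shape.length → PySem.List.pyGetD stride (i : Int) 0 = 1 →
    i < ((chars.map List.length).getD 26)
instance (shape : List Int) (stride : List Int) (chars : Option (List String)) : Decidable (Pre_gen_indices_strided shape stride chars) := by unfold Pre_gen_indices_strided; infer_instance
def pvWitness_gen_indices_strided : List Int × List Int × Option (List String) := ([4, 5, 6], [1, 6, 1], none)

def Spec_gen_indices_strided (shape : List Int) (stride : List Int) (chars : Option (List String)) (out : String) : Prop := out = gen_indices_strided_alt shape stride chars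
instance (shape : List Int) (stride : List Int) (chars : Option (List String)) (out : String) : Decidable (Spec_gen_indices_strided shape stride chars out) := by unfold Spec_gen_indices_strided; infer_instance

-- ===== CLAIM (what is proved, stated in full; the proofs are below) =====
def Claim_equal_gen_indices_strided : Prop := ∀ (shape : List Int) (stride : List Int) (chars : Option (List String)), Dom_gen_indices_strided shape stride chars → Pre_gen_indices_strided shape stride chars → Spec_gen_indices_strided shape stride chars (gen_indices_strided shape stride chars)

-- ===== LEMMAS AND PROOFS =====


-- the " * {shape[k]}" factor contributed by a qualifying position k
def pvMul (shape : List Int) (k : Nat) : String :=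
  " * " ++ PySem.Int.toStr (PySem.List.pyGetD shape (k : Int) 0)

-- suffix of " * shape" factors over qualifying positions in [k, k+fuel)
def pvSfxF (shape stride : List Int) : Nat → Nat → String
  | 0, _ => ""
  | f+1, k =>
    (if PySem.List.pyGetD stride (k : Int) 0 = 1 then pvMul shape k else "") ++
    pvSfxF shape stride f (k+1)

def pvSfx (shape stride : List Int) (k : Nat) : String :=
  pvSfxF shape stride (shape.length - k) k

-- the terms for qualifying positions in [k, k+fuel), in increasing order
def pvTrmF (cs : List String) (shape stride : List Int) : Nat → Nat → List String
  | 0, _ => []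
  | f+1, k =>
    (if PySem.List.pyGetD stride (k : Int) 0 = 1
     then [PySem.List.pyGetD cs (k : Int) "" ++ pvSfx shape stride (k+1)] else []) ++
    pvTrmF cs shape stride f (k+1)

def pvCat : List String → String
  | [] => ""
  | t :: ts => t ++ " + " ++ pvCat ts

lemma pvSfx_stop (shape stride : List Int) (k : Nat) (h : shape.length ≤ k) :
    pvSfx shape stride k = "" := by
  unfold pvSfx; rw [Nat.sub_eq_zero_of_le h]; rfl

lemma pvSfx_step (shape stride : List Int) (k : Nat) (h : k < shape.length) :
    pvSfx shape stride k =
      (if PySem.List.pyGetD stride (k : Int) 0 = 1 then pvMul shape k else "") ++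
      pvSfx shape stride (k+1) := by
  unfold pvSfx
  have h2 : shape.length - k = (shape.length - (k+1)) + 1 := by omega
  rw [h2]; rfl

lemma pvInner (shape stride : List Int) (i : Int) :
    ∀ (fuel : Nat) (d : Nat) (s : Int) (acc : String),
      shape.length - d ≤ fuel → i + 1 + s = (d : Int) →
      (PySem.List.enumerate (shape.drop d) s).foldl
        (fun acc2 (p : Int × Int) =>
          if PySem.List.pyGetD stride (i+1+p.1) 0 ≠ 1 then acc2
          else acc2 ++ (" * " ++ PySem.Int.toStr p.2)) acc
      = acc ++ pvSfx shape stride d := by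
  intro fuel
  induction fuel with
  | zero =>
    intro d s acc hf hs
    have hd : shape.length ≤ d := by omega
    rw [List.drop_eq_nil_of_le hd, pvSfx_stop shape stride d hd]
    simp [PySem.List.enumerate, String.append_empty]
  | succ f ih =>
    intro d s acc hf hs
    by_cases hd : d < shape.length
    · rw [List.drop_eq_getElem_cons hd, PySem.List.enumerate_cons]
      simp only [List.foldl_cons, hs]
      rw [pvSfx_step shape stride d hd]
      by_cases hq : PySem.List.pyGetD stride (d : Int) 0 = 1
      · rw [if_neg (not_not_intro hq), ih (d+1) (s+1) _ (by omega) (by push_cast; omega)]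
        simp [pvMul, PySem.List.pyGetD_natCast, hd, hq, String.append_assoc]
      · rw [if_pos hq, ih (d+1) (s+1) _ (by omega) (by push_cast; omega),
          if_neg (by simpa using hq)]
        simp
    · have hd' : shape.length ≤ d := by omega
      rw [List.drop_eq_nil_of_le hd', pvSfx_stop shape stride d hd']
      simp [PySem.List.enumerate, String.append_empty]

lemma pvOuterA (cs : List String) (shape stride : List Int) :
    ∀ (fuel k : Nat) (acc : String), shape.length - k ≤ fuel →
      (PySem.List.pyRange (k : Int) (shape.length : Int) 1).foldl (fun acc i =>
        if PySem.List.pyGetD stride i 0 ≠ 1 then acc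
        else
          let acc1 := acc ++ PySem.List.pyGetD cs i ""
          let acc2 := (PySem.List.enumerate (PySem.List.slice shape (some (i+1)) none) 0).foldl
            (fun acc2 (p : Int × Int) =>
              if PySem.List.pyGetD stride (i+1+p.1) 0 ≠ 1 then acc2
              else acc2 ++ (" * " ++ PySem.Int.toStr p.2)) acc1
          acc2 ++ " + ") acc
      = acc ++ pvCat (pvTrmF cs shape stride (shape.length - k) k) := by
  intro fuel
  induction fuel with
  | zero =>
    intro k acc hf
    have hk : shape.length ≤ k := by omega
    rw [PySem.List.pyRange_one_eq_nil (by exact_mod_cast hk), Nat.sub_eq_zero_of_le hk]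
    simp [pvTrmF, pvCat, String.append_empty]
  | succ f ih =>
    intro k acc hf
    by_cases hk : k < shape.length
    · rw [PySem.List.pyRange_one_cons (by exact_mod_cast hk)]
      simp only [List.foldl_cons]
      have hslice : PySem.List.slice shape (some ((k : Int)+1)) none = shape.drop (k+1) := by
        have h1 : ((k : Int)+1) = (((k+1 : Nat)) : Int) := by push_cast; ring
        rw [h1, PySem.List.slice_from_natCast]
      have h2 : shape.length - k = (shape.length - (k+1)) + 1 := by omega
      rw [h2]
      by_cases hq : PySem.List.pyGetD stride (k : Int) 0 = 1
      · rw [if_neg (not_not_intro hq)]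
        simp only [hslice]
        rw [pvInner shape stride (k : Int) shape.length (k+1) 0 _ (by omega) (by push_cast; ring)]
        have h3 : ((k : Int) + 1) = (((k+1 : Nat)) : Int) := by push_cast; ring
        rw [h3, ih (k+1) _ (by omega)]
        show _ = acc ++ pvCat (pvTrmF cs shape stride _ k)
        rw [pvTrmF]
        rw [if_pos hq]
        simp [pvCat, String.append_assoc]
      · have h3 : ((k : Int) + 1) = (((k+1 : Nat)) : Int) := by push_cast; ring
        rw [if_pos hq, h3, ih (k+1) _ (by omega)]
        show _ = acc ++ pvCat (pvTrmF cs shape stride _ k)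
        rw [pvTrmF, if_neg hq]
        simp
    · have hk' : shape.length ≤ k := by omega
      rw [PySem.List.pyRange_one_eq_nil (by exact_mod_cast hk'), Nat.sub_eq_zero_of_le hk']
      simp [pvTrmF, pvCat, String.append_empty]

lemma pvA_eq (shape stride : List Int) (chars : Option (List String)) :
    gen_indices_strided shape stride chars =
      PySem.Str.slice
        (pvCat (pvTrmF (chars.getD pyCHARACTERS) shape stride shape.length 0)) none (some (-3)) := by
  show PySem.Str.slice _ none (some (-3)) = _
  have h := pvOuterA (chars.getD pyCHARACTERS) shape stride shape.length 0 "" (by omega)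
  simp only [Nat.cast_zero, Nat.sub_zero] at h
  rw [h]
  exact congrArg (fun s => PySem.Str.slice s none (some (-3))) String.empty_append

lemma pvTrmF_succ (cs : List String) (shape stride : List Int) :
    ∀ (f k : Nat),
      pvTrmF cs shape stride (f+1) k =
        pvTrmF cs shape stride f k ++
        (if PySem.List.pyGetD stride ((k+f : Nat) : Int) 0 = 1
         then [PySem.List.pyGetD cs ((k+f : Nat) : Int) "" ++ pvSfx shape stride (k+f+1)] else []) := by
  intro f
  induction f with
  | zero => intro k; simp [pvTrmF]
  | succ f ih =>
    intro k
    have he : k + 1 + f = k + (f + 1) := by omega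
    have h1 : pvTrmF cs shape stride (f+1+1) k =
        (if PySem.List.pyGetD stride (k : Int) 0 = 1
         then [PySem.List.pyGetD cs (k : Int) "" ++ pvSfx shape stride (k+1)] else []) ++
        pvTrmF cs shape stride (f+1) (k+1) := rfl
    have h2 : pvTrmF cs shape stride (f+1) k =
        (if PySem.List.pyGetD stride (k : Int) 0 = 1
         then [PySem.List.pyGetD cs (k : Int) "" ++ pvSfx shape stride (k+1)] else []) ++
        pvTrmF cs shape stride f (k+1) := rfl
    rw [h1, ih (k+1), he, h2, List.append_assoc]

lemma pvBfold (cs : List String) (shape stride : List Int) :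
    ∀ (k : Nat) (ts : List String), k ≤ shape.length →
      (PySem.List.pyRange ((k : Int) - 1) (-1) (-1)).foldl
        (fun (p : List String × String) i =>
          if PySem.List.pyGetD stride i 0 = 1 then
            (p.1 ++ [PySem.List.pyGetD cs i "" ++ p.2],
             (" * " ++ PySem.Int.toStr (PySem.List.pyGetD shape i 0)) ++ p.2)
          else p) (ts, pvSfx shape stride k)
      = (ts ++ (pvTrmF cs shape stride k 0).reverse, pvSfx shape stride 0) := by
  intro k
  induction k with
  | zero =>
    intro ts hk
    rw [show ((0 : Nat) : Int) - 1 = -1 from by norm_num,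
      PySem.List.pyRange_neg_one_eq_nil (by norm_num)]
    simp [pvTrmF]
  | succ k ih =>
    intro ts hk
    have hc : ((k + 1 : Nat) : Int) - 1 = (k : Int) := by push_cast; ring
    rw [hc, PySem.List.pyRange_neg_one_cons (by omega)]
    simp only [List.foldl_cons]
    have h4 := pvTrmF_succ cs shape stride k 0
    simp only [Nat.zero_add] at h4
    by_cases hq : PySem.List.pyGetD stride (k : Int) 0 = 1
    · rw [if_pos hq]
      have hs : (" * " ++ PySem.Int.toStr (PySem.List.pyGetD shape (k : Int) 0)) ++
          pvSfx shape stride (k+1) = pvSfx shape stride k := by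
        rw [pvSfx_step shape stride k (by omega), if_pos hq]; rfl
      rw [show " * " ++ PySem.Int.toStr (PySem.List.pyGetD shape ((k : Nat) : Int) 0) ++
          pvSfx shape stride (k+1) = pvSfx shape stride k from hs]
      rw [ih (ts ++ [PySem.List.pyGetD cs (k : Int) "" ++ pvSfx shape stride (k+1)]) (by omega)]
      rw [h4, if_pos hq]
      simp [List.append_assoc]
    · rw [if_neg hq]
      have hs : pvSfx shape stride (k+1) = pvSfx shape stride k := by
        rw [pvSfx_step shape stride k (by omega), if_neg hq, String.empty_append]
      rw [hs, ih ts (by omega), h4, if_neg hq]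
      simp

lemma pvB_eq (shape stride : List Int) (chars : Option (List String)) :
    gen_indices_strided_alt shape stride chars =
      PySem.Str.join " + " (pvTrmF (chars.getD pyCHARACTERS) shape stride shape.length 0) := by
  have hb := pvBfold (chars.getD pyCHARACTERS) shape stride shape.length [] le_rfl
  rw [pvSfx_stop shape stride shape.length le_rfl] at hb
  show PySem.Str.join " + " _ = _
  rw [hb]
  simp

lemma pvCat_toList (ts : List String) :
    (pvCat ts).toList = ts.flatMap (fun t => t.toList ++ (" + ").toList) := by
  induction ts with
  | nil => rfl
  | cons t ts ih => simp [pvCat, ih]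

lemma pvIntercalate (s a : List Char) (r : List (List Char)) :
    s.intercalate (a :: r) = a ++ (r.flatMap (fun u => s ++ u)) := by
  simp only [List.intercalate]
  induction r generalizing a <;> simp_all [List.intersperse]

lemma pvRotate (ts : List String) (sep : List Char) :
    ∀ t0 : String,
      ((t0 :: ts).flatMap (fun t => t.toList ++ sep)) =
        (t0.toList ++ ts.flatMap (fun t => sep ++ t.toList)) ++ sep := by
  induction ts with
  | nil => intro t0; simp
  | cons t1 ts ih => intro t0; simp only [List.flatMap_cons] at *; simp [ih t1]

lemma pvTrim (ts : List String) :
    PySem.Str.slice (pvCat ts) none (some (-3)) = PySem.Str.join " + " ts := by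
  apply String.toList_inj.mp
  have hs : (PySem.Str.slice (pvCat ts) none (some (-3))).toList =
      PySem.List.slice (pvCat ts).toList none (some (-3)) := by
    simp [PySem.Str.slice]
  rw [hs, PySem.List.slice_to_neg_ofNat _ 3 (by norm_num), pvCat_toList]
  have hj : (PySem.Str.join " + " ts).toList =
      List.intercalate ((" + " : String).toList) (ts.map String.toList) := by
    simp [PySem.Str.join, PySem.Chars.join]
  rw [hj]
  cases ts with
  | nil => simp [List.intercalate]
  | cons t0 ts' =>
    rw [pvRotate ts' _ t0, List.map_cons, pvIntercalate]
    have hfm : (ts'.map String.toList).flatMap (fun u => (" + " : String).toList ++ u) =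
        ts'.flatMap (fun t => (" + " : String).toList ++ t.toList) := by
      simp [List.flatMap_map]
    rw [hfm]
    have hlen : ((t0.toList ++ ts'.flatMap (fun t => (" + " : String).toList ++ t.toList)) ++
        (" + " : String).toList).length - 3 =
        (t0.toList ++ ts'.flatMap (fun t => (" + " : String).toList ++ t.toList)).length := by
      simp [List.length_append]
      omega
    rw [hlen, List.take_left]

-- ===== VERDICT (by name: the statement is the Claim_ definition above) =====
theorem gen_indices_strided_spec : Claim_equal_gen_indices_strided := by
  intro shape stride chars _ _
  unfold Spec_gen_indices_strided
  rw [pvA_eq, pvB_eq, pvTrim]
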